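-- pv_equiv track=rewrite | github.com/reportportal/service-auto-analyzer | app/machine_learning/training/training_defect_type_model.py | return_similar_objects_into_sample
-- ===== SOURCE A (Python) =====
-- def return_similar_objects_into_sample(x_train_ind: list[int], y_train: list[int],
--                                        data: list[tuple[str, str, str]], additional_logs: dict[int, list[int]],
--                                        label: str):
--     x_train = []
--     x_train_add = []
--     y_train_add = []
--
--     for idx, ind in enumerate(x_train_ind):
--         x_train.append(data[ind][0])
--         label_to_use = y_train[idx]
--         if ind in additional_logs and label_to_use != 1:
--             for idx_ in additional_logs[ind]:
--                 log_res, label_res, real_label = data[idx_]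
--                 if label_res == label:
--                     label_to_use = 1
--                     break
--         if ind in additional_logs:
--             for idx_ in additional_logs[ind]:
--                 x_train_add.append(data[idx_][0])
--                 y_train_add.append(label_to_use)
--     x_train.extend(x_train_add)
--     y_train.extend(y_train_add)
--     return x_train, y_train
-- ===== SOURCE B (Python) =====
-- def return_similar_objects_into_sample(x_train_ind: list[int], y_train: list[int],
--                                        data: list[tuple[str, str, str]], additional_logs: dict[int, list[int]],
--                                        label: str):
--     # Build, once per DISTINCT index, a table ind -> (texts of its additional logs,
--     # whether any of them carries `label`); the main pass then only does O(1) lookups,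
--     # so repeated indices in x_train_ind are never rescanned.
--     info = {}
--     for ind in dict.fromkeys(x_train_ind):
--         if ind in additional_logs:
--             idxs = additional_logs[ind]
--             info[ind] = ([data[i][0] for i in idxs],
--                          any(data[i][1] == label for i in idxs))
--     main = []
--     add_texts = []
--     add_labels = []
--     for ind, lbl in zip(x_train_ind, y_train):
--         main.append(data[ind][0])
--         if ind in info:
--             texts, matched = info[ind]
--             add_texts += texts
--             add_labels += [1 if lbl != 1 and matched else lbl] * len(texts)
--     y_train.extend(add_labels)
--     return main + add_texts, y_train
-- ===== Notes on version B (the rewrite author's own statement) =====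
-- stated objective: alternative
-- what changed: Instead of A's single pass that rescans additional_logs[ind] for every occurrence of ind (break-scan for the label plus a collection loop), B precomputes a lookup table over the DISTINCT indices of x_train_ind mapping each to its (texts, has_label_match) pair, then makes one pass over zip(x_train_ind, y_train) doing only O(1) lookups; same in-place y_train.extend.
import Mathlib
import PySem

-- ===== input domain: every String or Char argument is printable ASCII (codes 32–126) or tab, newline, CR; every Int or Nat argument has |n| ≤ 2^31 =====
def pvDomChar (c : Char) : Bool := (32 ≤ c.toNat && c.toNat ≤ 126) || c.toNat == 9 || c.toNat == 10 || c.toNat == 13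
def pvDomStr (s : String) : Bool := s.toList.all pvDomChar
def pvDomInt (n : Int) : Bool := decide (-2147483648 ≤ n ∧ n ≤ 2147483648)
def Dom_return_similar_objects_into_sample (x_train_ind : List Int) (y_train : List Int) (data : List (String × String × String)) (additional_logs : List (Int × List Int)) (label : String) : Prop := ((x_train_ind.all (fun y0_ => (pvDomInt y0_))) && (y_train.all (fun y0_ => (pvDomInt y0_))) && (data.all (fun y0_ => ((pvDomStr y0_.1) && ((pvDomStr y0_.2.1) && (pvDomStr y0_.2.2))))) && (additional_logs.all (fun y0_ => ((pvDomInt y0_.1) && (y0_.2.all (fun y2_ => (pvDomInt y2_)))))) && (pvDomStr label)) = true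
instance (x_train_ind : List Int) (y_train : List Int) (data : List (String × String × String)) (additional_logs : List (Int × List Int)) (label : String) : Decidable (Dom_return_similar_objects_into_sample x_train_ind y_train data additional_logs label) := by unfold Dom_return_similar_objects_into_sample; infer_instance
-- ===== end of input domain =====

-- B precomputes, once per DISTINCT index of x_train_ind, a table ind -> (texts, has-label-match),
-- then makes a single O(1)-lookup pass over zip(x_train_ind, y_train), so A's per-occurrence
-- rescans of additional_logs[ind] disappear; B performs the same in-place y_train.extend as A,
-- and the equivalence proved is about the return value.

-- ===== PORT A =====
-- inner 'for idx_ in additional_logs[ind]: … if label_res == label: label_to_use = 1; break'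
def aScan (data : List (String × String × String)) (label : String) (cur : Int) : List Int → Int
  | [] => cur
  | i :: rest =>
    if ((PySem.List.pyGet? data i).getD ("", "", "")).2.1 == label then 1
    else aScan data label cur rest

-- the main 'for idx, ind in enumerate(x_train_ind)' loop; state = (x_train, x_train_add, y_train_add)
def aLoop (y_train : List Int) (data : List (String × String × String))
    (al : PySem.Dict Int (List Int)) (label : String) (idx : Int) :
    List Int → List String × List String × List Int → List String × List String × List Int
  | [], st => st
  | ind :: rest, st =>
    let x_train := st.1 ++ [((PySem.List.pyGet? data ind).getD ("", "", "")).1]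
    let label_to_use := (PySem.List.pyGet? y_train idx).getD 0
    let label_to_use :=
      if (al.get? ind).isSome && label_to_use != 1 then
        aScan data label label_to_use ((al.get? ind).getD [])
      else label_to_use
    let st2 :=
      if (al.get? ind).isSome then
        ((al.get? ind).getD []).foldl
          (fun (p : List String × List Int) i =>
            (p.1 ++ [((PySem.List.pyGet? data i).getD ("", "", "")).1], p.2 ++ [label_to_use]))
          (st.2.1, st.2.2)
      else (st.2.1, st.2.2)
    aLoop y_train data al label (idx + 1) rest (x_train, st2.1, st2.2)

def return_similar_objects_into_sample (x_train_ind : List Int) (y_train : List Int) (data : List (String × String × String)) (additional_logs : List (Int × List Int)) (label : String) : List String × List Int :=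
  let al := PySem.Dict.mk additional_logs
  let st := aLoop y_train data al label 0 x_train_ind ([], [], [])
  (st.1 ++ st.2.1, y_train ++ st.2.2)

-- ===== PORT B =====
-- label to use for one (ind, lbl) pair given its table entry: '1 if lbl != 1 and matched else lbl'
def bLbl (lbl : Int) (matched : Bool) : Int := if lbl != 1 && matched then 1 else lbl

def return_similar_objects_into_sample_alt (x_train_ind : List Int) (y_train : List Int) (data : List (String × String × String)) (additional_logs : List (Int × List Int)) (label : String) : List String × List Int :=
  let al := PySem.Dict.mk additional_logs
  -- 'for ind in dict.fromkeys(x_train_ind): if ind in additional_logs: info[ind] = (texts, matched)'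
  let info := (PySem.List.dedup x_train_ind).foldl
    (fun (d : PySem.Dict Int (List String × Bool)) ind =>
      match al.get? ind with
      | some idxs =>
        d.insert ind
          (idxs.map (fun i => ((PySem.List.pyGet? data i).getD ("", "", "")).1),
           idxs.any (fun i => ((PySem.List.pyGet? data i).getD ("", "", "")).2.1 == label))
      | none => d)
    PySem.Dict.empty
  -- 'for ind, lbl in zip(x_train_ind, y_train): …' ; state = (main, add_texts, add_labels)
  let st := (x_train_ind.zip y_train).foldl
    (fun (st : List String × List String × List Int) p =>
      let main := st.1 ++ [((PySem.List.pyGet? data p.1).getD ("", "", "")).1]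
      match info.get? p.1 with
      | some tm =>
        (main, st.2.1 ++ tm.1,
         st.2.2 ++ List.replicate tm.1.length (bLbl p.2 tm.2))
      | none => (main, st.2.1, st.2.2))
    ([], [], [])
  (st.1 ++ st.2.1, y_train ++ st.2.2)

-- ===== PRECONDITION & SPEC =====
-- Pre_ = exactly the inputs where Python A returns (no IndexError): y_train covers every enumerate
-- index of x_train_ind, every visited index into data is in range (negative Python indexing allowed).
def Pre_return_similar_objects_into_sample (x_train_ind : List Int) (y_train : List Int) (data : List (String × String × String)) (additional_logs : List (Int × List Int)) (label : String) : Prop :=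
  x_train_ind.length ≤ y_train.length ∧
  ∀ ind ∈ x_train_ind, PySem.Raise.InRange data.length ind ∧
    ∀ i ∈ ((PySem.Dict.mk additional_logs).get? ind).getD [], PySem.Raise.InRange data.length i
instance (x_train_ind : List Int) (y_train : List Int) (data : List (String × String × String)) (additional_logs : List (Int × List Int)) (label : String) : Decidable (Pre_return_similar_objects_into_sample x_train_ind y_train data additional_logs label) := by unfold Pre_return_similar_objects_into_sample; infer_instance

def pvWitness_return_similar_objects_into_sample : List Int × List Int × (List (String × String × String)) × (List (Int × List Int)) × String :=
  ([0, 1], [0, 2], [("a", "x", "p"), ("b", "y", "q")], [(1, [0]), (5, [1])], "x")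

def Spec_return_similar_objects_into_sample (x_train_ind : List Int) (y_train : List Int) (data : List (String × String × String)) (additional_logs : List (Int × List Int)) (label : String) (out : List String × List Int) : Prop := out = return_similar_objects_into_sample_alt x_train_ind y_train data additional_logs label
instance (x_train_ind : List Int) (y_train : List Int) (data : List (String × String × String)) (additional_logs : List (Int × List Int)) (label : String) (out : List String × List Int) : Decidable (Spec_return_similar_objects_into_sample x_train_ind y_train data additional_logs label out) := by unfold Spec_return_similar_objects_into_sample; infer_instance

-- ===== CLAIM (what is proved, stated in full; the proofs are below) =====
def Claim_equal_return_similar_objects_into_sample : Prop := ∀ (x_train_ind : List Int) (y_train : List Int) (data : List (String × String × String)) (additional_logs : List (Int × List Int)) (label : String), Dom_return_similar_objects_into_sample x_train_ind y_train data additional_logs label → Pre_return_similar_objects_into_sample x_train_ind y_train data additional_logs label → Spec_return_similar_objects_into_sample x_train_ind y_train data additional_logs label (return_similar_objects_into_sample x_train_ind y_train data additional_logs label)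

-- ===== LEMMAS AND PROOFS =====

-- the per-index (texts, matched) value B's table stores
def bVal (data : List (String × String × String)) (label : String) (idxs : List Int) :
    List String × Bool :=
  (idxs.map (fun i => ((PySem.List.pyGet? data i).getD ("", "", "")).1),
   idxs.any (fun i => ((PySem.List.pyGet? data i).getD ("", "", "")).2.1 == label))

-- common closed form of both programs' (add_texts, add_labels), over the zipped (index, label) pairs
def bExtras (data : List (String × String × String)) (al : PySem.Dict Int (List Int))
    (label : String) (pairs : List (Int × Int)) : List (List String × Int) :=
  (pairs.filter (fun p => (al.get? p.1).isSome)).map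
    (fun p =>
      (((al.get? p.1).getD []).map (fun i => ((PySem.List.pyGet? data i).getD ("", "", "")).1),
       if p.2 != 1 && ((al.get? p.1).getD []).any
            (fun j => ((PySem.List.pyGet? data j).getD ("", "", "")).2.1 == label) then 1 else p.2))

theorem aScan_eq (data : List (String × String × String)) (label : String) (cur : Int)
    (logs : List Int) :
    aScan data label cur logs =
      if logs.any (fun j => ((PySem.List.pyGet? data j).getD ("", "", "")).2.1 == label) then 1
      else cur := by
  induction logs with
  | nil => simp [aScan]
  | cons i rest ih =>
    simp only [aScan, List.any_cons, Bool.or_eq_true]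
    by_cases h : (((PySem.List.pyGet? data i).getD ("", "", "")).2.1 == label) = true <;>
      simp [h, ih]

theorem aInner_eq (data : List (String × String × String)) (c : Int) (logs : List Int)
    (xa : List String) (ya : List Int) :
    logs.foldl
      (fun (p : List String × List Int) i =>
        (p.1 ++ [((PySem.List.pyGet? data i).getD ("", "", "")).1], p.2 ++ [c])) (xa, ya) =
      (xa ++ logs.map (fun i => ((PySem.List.pyGet? data i).getD ("", "", "")).1),
       ya ++ logs.map (fun _ => c)) := by
  induction logs generalizing xa ya with
  | nil => simp
  | cons i rest ih => simp [ih]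

theorem aLoop_eq (y : List Int) (data : List (String × String × String))
    (al : PySem.Dict Int (List Int)) (label : String) :
    ∀ (xs : List Int) (k : Nat) (xt xa : List String) (ya : List Int),
      k + xs.length ≤ y.length →
      aLoop y data al label (k : Int) xs (xt, xa, ya) =
        (xt ++ xs.map (fun ind => ((PySem.List.pyGet? data ind).getD ("", "", "")).1),
         xa ++ (bExtras data al label (xs.zip (y.drop k))).flatMap (fun e => e.1),
         ya ++ (bExtras data al label (xs.zip (y.drop k))).flatMap
            (fun e => e.1.map (fun _ => e.2))) := by
  intro xs
  induction xs with
  | nil => intro k xt xa ya _; simp [aLoop, bExtras]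
  | cons ind rest ih =>
    intro k xt xa ya hk
    have hklt : k < y.length := by simp at hk; omega
    have hdrop : y.drop k = y[k] :: y.drop (k + 1) := List.drop_eq_getElem_cons hklt
    have hget : PySem.List.pyGet? y (k : Int) = some y[k] := by
      simp [PySem.List.pyGet?_natCast, List.getElem?_eq_getElem hklt]
    have hrec : ((k : Int) + 1) = ((k + 1 : Nat) : Int) := by push_cast; ring
    simp only [aLoop, hget, Option.getD_some, hrec]
    rw [ih (k + 1) _ _ _ (by simp at hk ⊢; omega)]
    rw [hdrop]
    by_cases hmem : (al.get? ind).isSome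
    · simp only [hmem, Bool.true_and, if_true, aScan_eq, aInner_eq]
      simp only [bExtras, List.zip_cons_cons, List.filter_cons, hmem, if_true, List.map_cons,
        List.flatMap_cons]
      cases h1 : (y[k] != 1) <;>
        cases ha : (((al.get? ind).getD []).any
          (fun j => ((PySem.List.pyGet? data j).getD ("", "", "")).2.1 == label)) <;>
        simp_all [bExtras, Function.comp_def, List.map_const']
    · simp only [Bool.not_eq_true] at hmem
      simp only [hmem, Bool.false_and]
      simp only [bExtras, List.zip_cons_cons, List.filter_cons, hmem, List.map_cons]
      simp

-- what B's table fold produces at any key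
theorem bInfo_get (data : List (String × String × String))
    (al : PySem.Dict Int (List Int)) (label : String) :
    ∀ (l : List Int) (d : PySem.Dict Int (List String × Bool)) (ind : Int),
      (l.foldl
        (fun (d : PySem.Dict Int (List String × Bool)) ind =>
          match al.get? ind with
          | some idxs =>
            d.insert ind
              (idxs.map (fun i => ((PySem.List.pyGet? data i).getD ("", "", "")).1),
               idxs.any (fun i => ((PySem.List.pyGet? data i).getD ("", "", "")).2.1 == label))
          | none => d) d).get? ind =
      if ind ∈ l ∧ (al.get? ind).isSome then (al.get? ind).map (bVal data label)
      else d.get? ind := by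
  intro l
  induction l with
  | nil => intro d ind; simp
  | cons a rest ih =>
    intro d ind
    simp only [List.foldl_cons, ih, List.mem_cons]
    by_cases hmem : ind ∈ rest ∧ (al.get? ind).isSome
    · simp [hmem]
    · simp only [hmem, if_false]
      by_cases hai : ind = a
      · subst hai
        cases hal : al.get? ind with
        | none => simp [hal] at hmem ⊢
        | some idxs =>
          simp only [hal, Option.isSome_some, and_true] at hmem ⊢
          simp [PySem.Dict.get?_insert_self, bVal, hmem]
      · cases hal : al.get? a with
        | none => simp [hai, hmem]
        | some idxs => simp [PySem.Dict.get?_insert_of_ne _ _ hai, hai, hmem]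

-- B's main fold, in closed form, given that every index's table lookup is (al.get? ind).map bVal
theorem bLoop_eq (data : List (String × String × String))
    (al : PySem.Dict Int (List Int)) (label : String)
    (info : PySem.Dict Int (List String × Bool)) :
    ∀ (pairs : List (Int × Int)) (mt xa : List String) (ya : List Int),
      (∀ p ∈ pairs, info.get? p.1 = (al.get? p.1).map (bVal data label)) →
      (pairs.foldl
        (fun (st : List String × List String × List Int) p =>
          let main := st.1 ++ [((PySem.List.pyGet? data p.1).getD ("", "", "")).1]
          match info.get? p.1 with
          | some tm =>
            (main, st.2.1 ++ tm.1,
             st.2.2 ++ List.replicate tm.1.length (bLbl p.2 tm.2))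
          | none => (main, st.2.1, st.2.2)) (mt, xa, ya)) =
      (mt ++ pairs.map (fun p => ((PySem.List.pyGet? data p.1).getD ("", "", "")).1),
       xa ++ (bExtras data al label pairs).flatMap (fun e => e.1),
       ya ++ (bExtras data al label pairs).flatMap (fun e => e.1.map (fun _ => e.2))) := by
  intro pairs
  induction pairs with
  | nil => intro mt xa ya _; simp [bExtras]
  | cons p rest ih =>
    intro mt xa ya hlk
    have hp := hlk p (List.mem_cons_self ..)
    simp only [List.foldl_cons]
    cases hal : al.get? p.1 with
    | none =>
      simp only [hal, Option.map_none] at hp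
      rw [ih _ _ _ (fun q hq => hlk q (List.mem_cons_of_mem _ hq))]
      simp only [hp, bExtras, List.filter_cons, hal, Option.isSome_none, List.map_cons]
      simp
    | some idxs =>
      simp only [hal, Option.map_some] at hp
      rw [ih _ _ _ (fun q hq => hlk q (List.mem_cons_of_mem _ hq))]
      simp only [hp, bVal, bExtras, List.filter_cons, hal, Option.isSome_some, if_true,
        List.map_cons, List.flatMap_cons]
      cases hb : (p.2 != 1) <;>
        cases ha : idxs.any
          (fun j => ((PySem.List.pyGet? data j).getD ("", "", "")).2.1 == label) <;>
        simp_all [bLbl, bExtras, Function.comp_def, List.map_const', List.append_assoc]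

-- ===== VERDICT (by name: the statement is the Claim_ definition above) =====
theorem return_similar_objects_into_sample_spec : Claim_equal_return_similar_objects_into_sample := by
  intro x_train_ind y_train data additional_logs label _ hpre
  unfold Spec_return_similar_objects_into_sample
  unfold return_similar_objects_into_sample return_similar_objects_into_sample_alt
  dsimp only
  have h0 : (0 : Int) = ((0 : Nat) : Int) := rfl
  rw [h0, aLoop_eq y_train data (PySem.Dict.mk additional_logs) label x_train_ind 0 [] [] []
    (by simpa using hpre.1)]
  rw [bLoop_eq data (PySem.Dict.mk additional_logs) label _ (x_train_ind.zip y_train) [] [] []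
    (by
      intro p hp
      have hx : p.1 ∈ x_train_ind := (List.of_mem_zip hp).1
      rw [bInfo_get]
      cases h2 : (PySem.Dict.mk additional_logs).get? p.1 with
      | none => simp
      | some idxs => simp [hx])]
  have hmap : (x_train_ind.zip y_train).map
      (fun p => ((PySem.List.pyGet? data p.1).getD ("", "", "")).1) =
      x_train_ind.map (fun ind => ((PySem.List.pyGet? data ind).getD ("", "", "")).1) := by
    rw [show (fun p : ℤ × ℤ => ((PySem.List.pyGet? data p.1).getD ("", "", "")).1) =
      (fun ind => ((PySem.List.pyGet? data ind).getD ("", "", "")).1) ∘ Prod.fst from rfl,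
      ← List.map_map, List.map_fst_zip hpre.1]
  simp [hmap]
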